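-- pv_equiv track=rewrite | github.com/GeorgeD88/G-Vault | simplifier.py | abbreviator
-- ===== SOURCE A (Python) =====
-- def abbreviator(original: str) -> str:  # Returns the abbreviation of the word passed for argument original.
--     abbrev = ''
--     vowels = ['a', 'e', 'i', 'o', 'u']
--     was_left = False
--     was_center = False
--     was_right = False
--     start_w_vowel = False
--     # Example: accounts => left[acc] center[ou] right[nts] | documents => left[d] center[o] right[cuments]
--     iteration = 0
--     for ch in original:
--         is_vowel = True if ch in vowels else False
--         iteration += 1
--         if iteration == 1:
--             was_left = True
--             start_w_vowel = True if is_vowel else False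
--         # Everything below here (after the continue statement) is only for all letters after the first letter.
--         elif start_w_vowel:  # If the word starts with a vowel: V|C|REST => V|C
--             if not is_vowel and was_left:
--                 was_left = False
--                 was_center = True
--             elif is_vowel and was_center and not was_left:
--                 break
--         else:  # Else: C|V|C => C|V|c
--             if is_vowel and was_left:
--                 was_left = False
--                 was_center = True
--             elif not is_vowel and was_center:
--                 was_center = False
--                 was_right = True
--             elif is_vowel and was_right:
--                 break
--         abbrev += ch
--     return abbrev
-- ===== SOURCE B (Python) =====
-- def _take_run(rest):
--     # split off the leading run of characters of the same class (vowel/consonant)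
--     b = rest[0] in 'aeiou'
--     run = ''
--     while rest and (rest[0] in 'aeiou') == b:
--         run += rest[0]
--         rest = rest[1:]
--     return run, rest
--
-- def abbreviator(original: str) -> str:
--     if not original:
--         return ''
--     n = 2 if original[0] in 'aeiou' else 3
--     out = ''
--     rest = original
--     for _ in range(n):
--         if rest:
--             run, rest = _take_run(rest)
--             out += run
--     return out
-- ===== Notes on version B (the rewrite author's own statement) =====
-- stated objective: simpler
-- what changed: Replaced the per-character boolean flag state machine with a split-into-runs decomposition: take the first 2 runs (vowel-start) or 3 runs (consonant-start) of same-class characters and concatenate them.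
import Mathlib
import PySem

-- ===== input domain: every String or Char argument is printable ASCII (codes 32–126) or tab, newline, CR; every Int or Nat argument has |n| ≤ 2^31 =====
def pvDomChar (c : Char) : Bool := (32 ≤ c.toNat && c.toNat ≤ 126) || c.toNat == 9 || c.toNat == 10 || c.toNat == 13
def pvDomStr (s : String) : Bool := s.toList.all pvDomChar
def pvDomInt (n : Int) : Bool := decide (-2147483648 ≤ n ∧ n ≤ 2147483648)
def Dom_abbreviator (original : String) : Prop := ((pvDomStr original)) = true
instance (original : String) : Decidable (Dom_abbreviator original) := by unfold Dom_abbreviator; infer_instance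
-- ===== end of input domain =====

-- B replaces A's per-character flag state machine by splitting the word into same-class
-- runs and concatenating the first 2 (vowel-start) or 3 (consonant-start) runs: simpler.

-- ===== PORT A =====
def pvVowels : List Char := ['a', 'e', 'i', 'o', 'u']

-- A's for-loop: state (abbrev, was_left, was_center, was_right, start_w_vowel, iteration);
-- 'break' returns the accumulator without the current character.
def pvALoop (chars : List Char) (acc : List Char)
    (wasL wasC wasR swv : Bool) (it : Int) : List Char :=
  match chars with
  | [] => acc
  | ch :: rest =>
    let isV : Bool := pvVowels.contains ch
    let it' := it + 1
    if it' == 1 then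
      pvALoop rest (acc ++ [ch]) true wasC wasR (if isV then true else false) it'
    else if swv then
      if !isV && wasL then pvALoop rest (acc ++ [ch]) false true wasR swv it'
      else if isV && wasC && !wasL then acc
      else pvALoop rest (acc ++ [ch]) wasL wasC wasR swv it'
    else
      if isV && wasL then pvALoop rest (acc ++ [ch]) false true wasR swv it'
      else if !isV && wasC then pvALoop rest (acc ++ [ch]) wasL false true swv it'
      else if isV && wasR then acc
      else pvALoop rest (acc ++ [ch]) wasL wasC wasR swv it'

def abbreviator (original : String) : String :=
  String.mk (pvALoop original.toList [] false false false false 0)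

-- ===== PORT B =====
def pvIsVowel (c : Char) : Bool := "aeiou".toList.contains c

-- _take_run's while loop: peel off the leading run of class b
def pvTakeRunLoop (rest : List Char) (b : Bool) (run : List Char) : List Char × List Char :=
  match rest with
  | [] => (run, [])
  | c :: t => if pvIsVowel c == b then pvTakeRunLoop t b (run ++ [c]) else (run, c :: t)

-- _take_run (only ever called with a non-empty rest, as in Source B)
def pvTakeRun (rest : List Char) : List Char × List Char :=
  match rest with
  | [] => ([], [])
  | c :: _ => pvTakeRunLoop rest (pvIsVowel c) []

-- the 'for _ in range(n)' loop of B
def pvBLoop (n : Nat) (out rest : List Char) : List Char :=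
  match n with
  | 0 => out
  | Nat.succ m =>
    if rest ≠ [] then
      let p := pvTakeRun rest
      pvBLoop m (out ++ p.1) p.2
    else pvBLoop m out rest

def abbreviator_alt (original : String) : String :=
  match original.toList with
  | [] => ""
  | c :: _ =>
    let n : Nat := if pvIsVowel c then 2 else 3
    String.mk (pvBLoop n [] original.toList)

-- ===== PRECONDITION & SPEC =====
def Spec_abbreviator (original : String) (out : String) : Prop := out = abbreviator_alt original
instance (original : String) (out : String) : Decidable (Spec_abbreviator original out) := by unfold Spec_abbreviator; infer_instance

-- ===== CLAIM (what is proved, stated in full; the proofs are below) =====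
def Claim_equal_abbreviator : Prop := ∀ (original : String), Dom_abbreviator original → Spec_abbreviator original (abbreviator original)

-- ===== LEMMAS AND PROOFS =====

theorem pvVowel_mem (c : Char) : (c ∈ pvVowels) ↔ pvIsVowel c = true := by
  simp [pvVowels, pvIsVowel]

-- B's run splitter is span
theorem takeRunLoop_eq (l : List Char) (b : Bool) :
    ∀ run, pvTakeRunLoop l b run =
      (run ++ l.takeWhile (fun c => pvIsVowel c == b),
       l.dropWhile (fun c => pvIsVowel c == b)) := by
  induction l with
  | nil => intro run; simp [pvTakeRunLoop]
  | cons c t ih =>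
    intro run
    cases h : (pvIsVowel c == b) <;>
      simp [pvTakeRunLoop, List.takeWhile, List.dropWhile, h, ih]

-- A's loop in vowel-mode, center state: append consonants until a vowel
theorem aLoop_VC (l : List Char) : ∀ acc it, 1 ≤ it →
    pvALoop l acc false true false true it =
      acc ++ l.takeWhile (fun c => pvIsVowel c == false) := by
  induction l with
  | nil => intro acc it _; simp [pvALoop]
  | cons c t ih =>
    intro acc it h
    have hit : (it + 1 == 1) = false := by simp; omega
    by_cases hv : pvIsVowel c = true <;>
      simp [pvALoop, hit, List.takeWhile, pvVowel_mem, hv,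
        ih (acc ++ [c]) (it + 1) (by omega)]

-- A's loop in vowel-mode, left state: vowels then the consonant run
theorem aLoop_VL (l : List Char) : ∀ acc it, 1 ≤ it →
    pvALoop l acc true false false true it =
      acc ++ l.takeWhile (fun c => pvIsVowel c == true) ++
        (l.dropWhile (fun c => pvIsVowel c == true)).takeWhile (fun c => pvIsVowel c == false) := by
  induction l with
  | nil => intro acc it _; simp [pvALoop]
  | cons c t ih =>
    intro acc it h
    have hit : (it + 1 == 1) = false := by simp; omega
    by_cases hv : pvIsVowel c = true
    · simp [pvALoop, hit, List.takeWhile, List.dropWhile, pvVowel_mem, hv,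
        ih (acc ++ [c]) (it + 1) (by omega)]
    · simp [pvALoop, hit, List.takeWhile, List.dropWhile, pvVowel_mem, hv,
        aLoop_VC t (acc ++ [c]) (it + 1) (by omega)]

-- A's loop in consonant-mode, right state: append consonants until a vowel
theorem aLoop_CR (l : List Char) : ∀ acc it, 1 ≤ it →
    pvALoop l acc false false true false it =
      acc ++ l.takeWhile (fun c => pvIsVowel c == false) := by
  induction l with
  | nil => intro acc it _; simp [pvALoop]
  | cons c t ih =>
    intro acc it h
    have hit : (it + 1 == 1) = false := by simp; omega
    by_cases hv : pvIsVowel c = true <;>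
      simp [pvALoop, hit, List.takeWhile, pvVowel_mem, hv,
        ih (acc ++ [c]) (it + 1) (by omega)]

-- A's loop in consonant-mode, center state: vowels then the consonant run
theorem aLoop_CC (l : List Char) : ∀ acc it, 1 ≤ it →
    pvALoop l acc false true false false it =
      acc ++ l.takeWhile (fun c => pvIsVowel c == true) ++
        (l.dropWhile (fun c => pvIsVowel c == true)).takeWhile (fun c => pvIsVowel c == false) := by
  induction l with
  | nil => intro acc it _; simp [pvALoop]
  | cons c t ih =>
    intro acc it h
    have hit : (it + 1 == 1) = false := by simp; omega
    by_cases hv : pvIsVowel c = true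
    · simp [pvALoop, hit, List.takeWhile, List.dropWhile, pvVowel_mem, hv,
        ih (acc ++ [c]) (it + 1) (by omega)]
    · simp [pvALoop, hit, List.takeWhile, List.dropWhile, pvVowel_mem, hv,
        aLoop_CR t (acc ++ [c]) (it + 1) (by omega)]

-- A's loop in consonant-mode, left state
theorem aLoop_CL (l : List Char) : ∀ acc it, 1 ≤ it →
    pvALoop l acc true false false false it =
      acc ++ l.takeWhile (fun c => pvIsVowel c == false) ++
        ((l.dropWhile (fun c => pvIsVowel c == false)).takeWhile (fun c => pvIsVowel c == true) ++
          ((l.dropWhile (fun c => pvIsVowel c == false)).dropWhile (fun c => pvIsVowel c == true)).takeWhile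
            (fun c => pvIsVowel c == false)) := by
  induction l with
  | nil => intro acc it _; simp [pvALoop]
  | cons c t ih =>
    intro acc it h
    have hit : (it + 1 == 1) = false := by simp; omega
    by_cases hv : pvIsVowel c = true
    · simp [pvALoop, hit, List.takeWhile, List.dropWhile, pvVowel_mem, hv,
        aLoop_CC t (acc ++ [c]) (it + 1) (by omega)]
    · simp [pvALoop, hit, List.takeWhile, List.dropWhile, pvVowel_mem, hv,
        ih (acc ++ [c]) (it + 1) (by omega)]

-- head of dropWhile falsifies the predicate
theorem head_dropWhile_false {p : Char → Bool} {l : List Char} {c : Char} {t : List Char}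
    (h : l.dropWhile p = c :: t) : p c = false := by
  have hne : l.dropWhile p ≠ [] := by simp [h]
  have := List.head_dropWhile_not p hne
  simpa [h] using this

-- B's loop on one run: split it off (or skip if rest is empty)
theorem bLoop_step (m : Nat) (out : List Char) (rest : List Char) (b : Bool)
    (hb : ∀ c t, rest = c :: t → pvIsVowel c = b) :
    pvBLoop (m + 1) out rest =
      pvBLoop m (out ++ rest.takeWhile (fun c => pvIsVowel c == b))
        (rest.dropWhile (fun c => pvIsVowel c == b)) := by
  cases rest with
  | nil => simp [pvBLoop]
  | cons c t =>
    have hc := hb c t rfl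
    simp [pvBLoop, pvTakeRun, takeRunLoop_eq, List.takeWhile, List.dropWhile, hc]

-- ===== VERDICT (by name: the statement is the Claim_ definition above) =====
theorem abbreviator_spec : Claim_equal_abbreviator := by
  intro original _
  unfold Spec_abbreviator abbreviator abbreviator_alt
  cases hL : original.toList with
  | nil => rfl
  | cons c t =>
    by_cases hv : pvIsVowel c = true
    · -- vowel start: A keeps V-run then C-run; B takes the first 2 runs
      have hd : (decide (c ∈ pvVowels)) = true := by simp [pvVowel_mem, hv]
      have h0 : pvALoop (c :: t) [] false false false false 0
          = pvALoop t [c] true false false true 1 := by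
        simp [pvALoop, hd]
      have h1 := bLoop_step 1 [] (c :: t) true
        (by rintro c' t' h'; cases h'; exact hv)
      have h2 := bLoop_step 0 ([] ++ (c :: t).takeWhile (fun x => pvIsVowel x == true))
        ((c :: t).dropWhile (fun x => pvIsVowel x == true)) false
        (fun c' t' h' => by simpa using head_dropWhile_false h')
      simp only [hv, if_true]
      rw [h0, aLoop_VL t [c] 1 (by omega), h1, h2]
      simp [pvBLoop, List.takeWhile, List.dropWhile, hv]
    · -- consonant start: A keeps C-, V-, C-runs; B takes the first 3 runs
      have hv' : pvIsVowel c = false := by simpa using hv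
      have hd : (decide (c ∈ pvVowels)) = false := by simp [pvVowel_mem, hv']
      have h0 : pvALoop (c :: t) [] false false false false 0
          = pvALoop t [c] true false false false 1 := by
        simp [pvALoop, hd]
      have h1 := bLoop_step 2 [] (c :: t) false
        (by rintro c' t' h'; cases h'; exact hv')
      have h2 := bLoop_step 1 ([] ++ (c :: t).takeWhile (fun x => pvIsVowel x == false))
        ((c :: t).dropWhile (fun x => pvIsVowel x == false)) true
        (fun c' t' h' => by simpa using head_dropWhile_false h')
      have h3 := bLoop_step 0
        ([] ++ (c :: t).takeWhile (fun x => pvIsVowel x == false) ++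
          (((c :: t).dropWhile (fun x => pvIsVowel x == false)).takeWhile (fun x => pvIsVowel x == true)))
        (((c :: t).dropWhile (fun x => pvIsVowel x == false)).dropWhile (fun x => pvIsVowel x == true)) false
        (fun c' t' h' => by simpa using head_dropWhile_false h')
      simp only [hv', Bool.false_eq_true, if_false]
      rw [h0, aLoop_CL t [c] 1 (by omega), h1, h2, h3]
      simp [pvBLoop, List.takeWhile, List.dropWhile, hv']
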